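-- pv_equiv track=rewrite | github.com/RahmanTeamDevelopment/VPS | vps_/helper.py | parse_csn
-- ===== SOURCE A (Python) =====
-- def parse_csn(csn):
--
--     # Split to ger c. part
--     csn_c = csn.split('_p.', 1)[0] if '_p.' in csn else csn
--
--     # Find where to split the c. part to get coordinates and dna change
--     found = [csn_c.find(x) for x in ['A>', 'C>', 'G>', 'T>', 'del', 'ins', 'dup'] if x in csn_c]
--     cuthere = min(found)
--
--     # Split c. part to get coordinates and dna change
--     coords = csn_c[csn_c.find("c.") + 2:cuthere]
--     dna_change = csn_c[cuthere:]
--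
--     # Split coordinates to first and second coordinate
--     if "_" in coords:
--         [coord_part1, coord_part2] = coords.split('_', 1)
--     else:
--         coord_part1, coord_part2 = coords, None
--
--     return coord_part1, coord_part2, dna_change
-- ===== SOURCE B (Python) =====
-- def parse_csn(csn):
--     # c. part: everything before the first '_p.' (whole string if absent)
--     csn_c = csn.partition('_p.')[0]
--
--     # One left-to-right scan: first position where any marker starts
--     cuthere = next(i for i in range(len(csn_c))
--                    if csn_c[i:i + 2] in ('A>', 'C>', 'G>', 'T>')
--                    or csn_c[i:i + 3] in ('del', 'ins', 'dup'))
--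
--     coords = csn_c[csn_c.find('c.') + 2:cuthere]
--     dna_change = csn_c[cuthere:]
--
--     part1, sep, part2 = coords.partition('_')
--     return part1, part2 if sep else None, dna_change
-- ===== Notes on version B (the rewrite author's own statement) =====
-- stated objective: idiomatic
-- what changed: B finds the cut point with a single left-to-right scan for the first position where any of the seven markers starts (instead of seven separate full-string find() scans collected into a list and min()-ed), and replaces both conditional split('...',1) idioms by str.partition.
-- outside the precondition, e.g. on parse_csn('c.76'): A raises ValueError, B raises StopIteration
import Mathlib
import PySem

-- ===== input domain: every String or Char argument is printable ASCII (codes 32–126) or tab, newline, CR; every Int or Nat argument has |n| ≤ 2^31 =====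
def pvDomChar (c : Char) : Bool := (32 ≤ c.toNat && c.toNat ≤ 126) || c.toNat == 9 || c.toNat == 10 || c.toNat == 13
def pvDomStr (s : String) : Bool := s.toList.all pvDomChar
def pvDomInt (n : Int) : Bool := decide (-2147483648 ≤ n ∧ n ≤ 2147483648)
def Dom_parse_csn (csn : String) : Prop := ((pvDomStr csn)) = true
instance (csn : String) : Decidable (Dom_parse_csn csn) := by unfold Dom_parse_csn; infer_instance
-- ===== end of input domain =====

-- B replaces the seven find-and-min scans by a single left-to-right scan for the first
-- marker position, and the conditional splits by str.partition (objective: idiomatic).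

-- ===== PORT A =====
def pvMarkers : List (List Char) :=
  [['A','>'], ['C','>'], ['G','>'], ['T','>'], ['d','e','l'], ['i','n','s'], ['d','u','p']]

def parse_csn (csn : String) : String × Option String × String :=
  let cs := csn.toList
  -- csn_c = csn.split('_p.', 1)[0] if '_p.' in csn else csn
  let csn_c :=
    if PySem.Chars.isIn ['_','p','.'] cs then
      match PySem.Chars.splitMax? cs ['_','p','.'] 1 with
      | some parts =>
        match PySem.List.pyGet? parts 0 with
        | some h => h
        | none => []          -- unreachable: split always yields a nonempty list
      | none => []            -- unreachable: separator '_p.' is nonempty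
    else cs
  -- found = [csn_c.find(x) for x in markers if x in csn_c]
  let found := (pvMarkers.filter (fun x => PySem.Chars.isIn x csn_c)).map
      (fun x => PySem.Chars.find csn_c x)
  -- cuthere = min(found)
  match PySem.List.min? found (fun v => v) with
  | none => ("", none, "")    -- Python raises ValueError here (min of empty); excluded by Pre_
  | some cuthere =>
    let coords := PySem.Chars.slice csn_c (some (PySem.Chars.find csn_c ['c','.'] + 2)) (some cuthere)
    let dna_change := PySem.Chars.slice csn_c (some cuthere) none
    if PySem.Chars.isIn ['_'] coords then
      match PySem.Chars.splitMax? coords ['_'] 1 with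
      | some [p1, p2] => (String.ofList p1, some (String.ofList p2), String.ofList dna_change)
      | _ => ("", none, "")   -- unreachable: '_' in coords and maxsplit 1 give exactly two parts
    else (String.ofList coords, none, String.ofList dna_change)

-- ===== PORT B =====
-- hand port of str.partition(sep); exact for nonempty sep (both uses below pass a nonempty sep)
def pyPartition (s sep : List Char) : List Char × List Char × List Char :=
  let i := PySem.Chars.find s sep
  if i < 0 then (s, [], [])
  else (s.take i.toNat, sep, s.drop (i.toNat + sep.length))

def pvIsMarkAt (s : List Char) (i : Nat) : Bool :=
  [['A','>'], ['C','>'], ['G','>'], ['T','>']].contains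
      (PySem.Chars.slice s (some (i : Int)) (some ((i : Int) + 2)))
  || [['d','e','l'], ['i','n','s'], ['d','u','p']].contains
      (PySem.Chars.slice s (some (i : Int)) (some ((i : Int) + 3)))

-- next(i for i in range(len(s)) if <marker at i>); none = StopIteration
def pvFirstMark (s : List Char) (i : Nat) : Option Nat :=
  if i < s.length then
    if pvIsMarkAt s i then some i else pvFirstMark s (i + 1)
  else none
termination_by s.length - i

def parse_csn_alt (csn : String) : String × Option String × String :=
  let cs := csn.toList
  let csn_c := (pyPartition cs ['_','p','.']).1
  match pvFirstMark csn_c 0 with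
  | none => ("", none, "")    -- Python raises StopIteration here; excluded by Pre_
  | some cuthere =>
    let coords := PySem.Chars.slice csn_c (some (PySem.Chars.find csn_c ['c','.'] + 2)) (some (cuthere : Int))
    let dna_change := PySem.Chars.slice csn_c (some (cuthere : Int)) none
    let p := pyPartition coords ['_']
    (String.ofList p.1, if p.2.1.isEmpty then none else some (String.ofList p.2.2), String.ofList dna_change)

-- ===== PRECONDITION & SPEC =====
-- the c. part of csn (before any '_p.'), stated once for Pre_
def pvCPart (cs : List Char) : List Char :=
  if PySem.Chars.isIn ['_','p','.'] cs then cs.take (PySem.Chars.find cs ['_','p','.']).toNat else cs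

-- Pre_ excludes inputs whose c. part contains none of the seven markers: there Python A
-- raises ValueError (min of an empty list) and Python B raises StopIteration.
def Pre_parse_csn (csn : String) : Prop :=
  (pvMarkers.any (fun x => PySem.Chars.isIn x (pvCPart csn.toList))) = true
instance (csn : String) : Decidable (Pre_parse_csn csn) := by unfold Pre_parse_csn; infer_instance

def pvWitness_parse_csn : String := "c.76_78delACT_p.X"

def Spec_parse_csn (csn : String) (out : String × Option String × String) : Prop := out = parse_csn_alt csn
instance (csn : String) (out : String × Option String × String) : Decidable (Spec_parse_csn csn out) := by unfold Spec_parse_csn; infer_instance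

-- ===== CLAIM (what is proved, stated in full; the proofs are below) =====
def Claim_equal_parse_csn : Prop := ∀ (csn : String), Dom_parse_csn csn → Pre_parse_csn csn → Spec_parse_csn csn (parse_csn csn)

-- ===== LEMMAS AND PROOFS =====
-- some marker starts at position i
def MatchAt (s : List Char) (i : Nat) : Prop := ∃ x ∈ pvMarkers, x <+: s.drop i

theorem pvSliceN (s : List Char) (i n : Nat) :
    PySem.Chars.slice s (some (i : Int)) (some ((i : Int) + (n : Int))) = (s.drop i).take n := by
  rw [PySem.Chars.slice_eq_listSlice, PySem.List.slice_natCast_add]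

theorem pvIsMarkAt_iff (s : List Char) (i : Nat) :
    pvIsMarkAt s i = true ↔ MatchAt s i := by
  have e2 : ((2 : Int)) = ((2 : Nat) : Int) := rfl
  have e3 : ((3 : Int)) = ((3 : Nat) : Int) := rfl
  simp only [pvIsMarkAt, e2, e3, pvSliceN, Bool.or_eq_true, List.contains_eq_mem,
    List.mem_cons, List.not_mem_nil, or_false, decide_eq_true_eq, MatchAt, pvMarkers,
    exists_eq_or_imp, exists_eq_left, List.prefix_iff_eq_take, List.length_cons,
    List.length_nil]
  norm_num
  tauto

theorem pvMarkers_ne_nil {x : List Char} (hx : x ∈ pvMarkers) : x ≠ [] := by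
  simp only [pvMarkers, List.mem_cons, List.not_mem_nil, or_false] at hx
  rcases hx with rfl | rfl | rfl | rfl | rfl | rfl | rfl <;> simp

theorem pvMatchAt_lt {s : List Char} {j : Nat} (h : MatchAt s j) : j < s.length := by
  rcases h with ⟨x, hx, hpre⟩
  by_contra hge
  rw [List.drop_eq_nil_of_le (by omega)] at hpre
  exact pvMarkers_ne_nil hx (List.prefix_nil.mp hpre)

-- B's scan returns the least matching position
theorem pvFirstMark_eq (s : List Char) (j : Nat) (hM : MatchAt s j)
    (hlt : ∀ k < j, ¬ MatchAt s k) : pvFirstMark s 0 = some j := by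
  have hjlen : j < s.length := pvMatchAt_lt hM
  suffices h : ∀ d i, i ≤ j → j - i = d → pvFirstMark s i = some j from
    h j 0 (by omega) (by omega)
  intro d
  induction d with
  | zero =>
    intro i hi hd
    have hij : i = j := by omega
    subst hij
    rw [pvFirstMark, if_pos hjlen, if_pos ((pvIsMarkAt_iff s i).mpr hM)]
  | succ d ih =>
    intro i hi hd
    have hij : i < j := by omega
    have hmk : ¬ (pvIsMarkAt s i = true) := by rw [pvIsMarkAt_iff]; exact hlt i hij
    rw [pvFirstMark, if_pos (by omega : i < s.length), if_neg hmk]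
    exact ih (i + 1) (by omega) (by omega)

-- splitOnMax.go with remaining maxsplit 0 collects the rest as one piece
theorem pvGo0 (sep : List Char) (fuel : Nat) (l : List Char) (acc : List (List Char)) :
    PySem.Chars.splitOnMax.go sep fuel 0 l [] acc = (l :: acc).reverse := by
  cases fuel with
  | zero => cases l <;> simp [PySem.Chars.splitOnMax.go]
  | succ f => cases l <;> simp [PySem.Chars.splitOnMax.go]

-- splitOnMax.go with maxsplit 1 splits at the first occurrence j of sep
theorem pvGo1 (sep : List Char) (hne : sep ≠ []) (j : Nat) :
    ∀ fuel l cur, j < fuel → sep <+: l.drop j → (∀ i < j, ¬ sep <+: l.drop i) →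
      PySem.Chars.splitOnMax.go sep fuel 1 l cur [] =
        [cur.reverse ++ l.take j, l.drop (j + sep.length)] := by
  induction j with
  | zero =>
    intro fuel l cur hfuel hpre _
    cases fuel with
    | zero => omega
    | succ f =>
      cases l with
      | nil => exact absurd (List.prefix_nil.mp (by simpa using hpre)) hne
      | cons c rest =>
        have hpp : sep.isPrefixOf (c :: rest) = true :=
          List.isPrefixOf_iff_prefix.mpr (by simpa using hpre)
        simp only [PySem.Chars.splitOnMax.go, hpp, if_true, if_neg (by omega : ¬ (1:Nat) = 0)]
        rw [pvGo0]
        simp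
  | succ j ih =>
    intro fuel l cur hfuel hpre hmin
    cases fuel with
    | zero => omega
    | succ f =>
      cases l with
      | nil =>
        exact absurd (List.prefix_nil.mp (by simpa using hpre)) hne
      | cons c rest =>
        have hpp : sep.isPrefixOf (c :: rest) = false := by
          rw [← Bool.not_eq_true, List.isPrefixOf_iff_prefix]
          simpa using hmin 0 (by omega)
        simp only [PySem.Chars.splitOnMax.go, hpp, Bool.false_eq_true, if_false,
          if_neg (by omega : ¬ (1:Nat) = 0)]
        rw [ih f rest (c :: cur) (by omega) (by simpa using hpre)
          (fun i hi => by simpa using hmin (i + 1) (by omega))]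
        have harith : j + 1 + sep.length = (j + sep.length) + 1 := by omega
        simp [harith]

-- the two pieces of s.split(sep, 1) when sep occurs in s
theorem pvSplit_head (s sep : List Char) (hin : PySem.Chars.isIn sep s = true) (hne : sep ≠ []) :
    PySem.Chars.splitOnMax s sep 1 =
      [s.take (PySem.Chars.find s sep).toNat,
       s.drop ((PySem.Chars.find s sep).toNat + sep.length)] := by
  have hnn : 0 ≤ PySem.Chars.find s sep :=
    (PySem.Chars.find_nonneg_iff s sep).mpr ((PySem.Chars.isIn_iff_infix sep s).mp hin)
  obtain ⟨hpre, hmin⟩ := PySem.Chars.find_spec hnn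
  have hle : PySem.Chars.find s sep ≤ (s.length : Int) := PySem.Chars.find_le_length s sep
  rw [PySem.Chars.splitOnMax, if_neg (by omega)]
  have h1 : (1:Int).toNat = 1 := rfl
  rw [h1, pvGo1 sep hne (PySem.Chars.find s sep).toNat (s.length + 1) s []
    (by omega) hpre hmin]
  simp

theorem pvFind_neg_of_not_isIn {s sub : List Char} (h : ¬ PySem.Chars.isIn sub s = true) :
    PySem.Chars.find s sub = -1 := by
  have h1 := PySem.Chars.neg_one_le_find (s := s) (sub := sub)
  rcases lt_or_ge (PySem.Chars.find s sub) 0 with hlt | hge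
  · omega
  · exact absurd ((PySem.Chars.isIn_iff_infix _ _).mpr
      ((PySem.Chars.find_nonneg_iff _ _).mp hge)) h

-- both ports' '_p.'-splits compute pvCPart
theorem pvCsnC_A (cs : List Char) :
    (if PySem.Chars.isIn ['_','p','.'] cs then
      match PySem.Chars.splitMax? cs ['_','p','.'] 1 with
      | some parts =>
        match PySem.List.pyGet? parts 0 with
        | some h => h
        | none => []
      | none => []
    else cs) = pvCPart cs := by
  unfold pvCPart
  by_cases hin : PySem.Chars.isIn ['_','p','.'] cs = true
  · rw [if_pos hin, if_pos hin, PySem.Chars.splitMax?, if_neg (by simp),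
      pvSplit_head cs ['_','p','.'] hin (by simp)]
    simp [PySem.List.pyGet?, PySem.List.pyIdx?]
  · rw [if_neg hin, if_neg hin]

theorem pvCsnC_B (cs : List Char) : (pyPartition cs ['_','p','.']).1 = pvCPart cs := by
  unfold pyPartition pvCPart
  by_cases hin : PySem.Chars.isIn ['_','p','.'] cs = true
  · have hnn : 0 ≤ PySem.Chars.find cs ['_','p','.'] :=
      (PySem.Chars.find_nonneg_iff _ _).mpr ((PySem.Chars.isIn_iff_infix _ _).mp hin)
    rw [if_pos hin]; simp [if_neg (by omega : ¬ PySem.Chars.find cs ['_','p','.'] < 0)]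
  · rw [if_neg hin]; simp [pvFind_neg_of_not_isIn hin]

-- the minimum of the seven finds is the least position where any marker starts
theorem pvMin_found (s : List Char) {m : Int}
    (hm : PySem.List.min? ((pvMarkers.filter (fun x => PySem.Chars.isIn x s)).map
      (fun x => PySem.Chars.find s x)) (fun v => v) = some m) :
    0 ≤ m ∧ MatchAt s m.toNat ∧ ∀ k < m.toNat, ¬ MatchAt s k := by
  have hmem := PySem.List.min?_mem hm
  have hmin := PySem.List.min?_isMin hm
  simp only [List.mem_map, List.mem_filter] at hmem
  rcases hmem with ⟨x, ⟨hx, hxin⟩, hfx⟩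
  have hnn : 0 ≤ m := hfx ▸ (PySem.Chars.find_nonneg_iff _ _).mpr
      ((PySem.Chars.isIn_iff_infix _ _).mp hxin)
  refine ⟨hnn, ⟨x, hx, ?_⟩, ?_⟩
  · have := (PySem.Chars.find_spec (s := s) (sub := x) (hfx ▸ hnn)).1
    rwa [hfx] at this
  · rintro k hk ⟨y, hy, hypre⟩
    have hyin : PySem.Chars.isIn y s = true :=
      (PySem.Chars.exists_prefix_drop_iff_isIn y s).mp ⟨k, hypre⟩
    have hymem : PySem.Chars.find s y ∈
        (pvMarkers.filter (fun x => PySem.Chars.isIn x s)).map (fun x => PySem.Chars.find s x) := by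
      simp only [List.mem_map, List.mem_filter]
      exact ⟨y, ⟨hy, hyin⟩, rfl⟩
    have hle : m ≤ PySem.Chars.find s y := hmin _ hymem
    have hynn : 0 ≤ PySem.Chars.find s y :=
      (PySem.Chars.find_nonneg_iff _ _).mpr ((PySem.Chars.isIn_iff_infix _ _).mp hyin)
    exact (PySem.Chars.find_spec hynn).2 k (by omega) hypre

-- agreement of the two tails, from a common csn_c and cut position
theorem pvTail_eq (s : List Char) (m : Int) :
    (let coords := PySem.Chars.slice s (some (PySem.Chars.find s ['c','.'] + 2)) (some m);
     let dna := PySem.Chars.slice s (some m) none;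
     (if PySem.Chars.isIn ['_'] coords then
        match PySem.Chars.splitMax? coords ['_'] 1 with
        | some [p1, p2] => (String.ofList p1, some (String.ofList p2), String.ofList dna)
        | _ => ("", none, "")
      else (String.ofList coords, none, String.ofList dna))) =
    (let coords := PySem.Chars.slice s (some (PySem.Chars.find s ['c','.'] + 2)) (some m);
     let dna := PySem.Chars.slice s (some m) none;
     let p := pyPartition coords ['_'];
     (String.ofList p.1, if p.2.1.isEmpty then none else some (String.ofList p.2.2),
      String.ofList dna)) := by
  simp only []
  generalize PySem.Chars.slice s (some (PySem.Chars.find s ['c','.'] + 2)) (some m) = coords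
  generalize PySem.Chars.slice s (some m) none = dna
  by_cases hin : PySem.Chars.isIn ['_'] coords = true
  · have hnn : 0 ≤ PySem.Chars.find coords ['_'] :=
      (PySem.Chars.find_nonneg_iff _ _).mpr ((PySem.Chars.isIn_iff_infix _ _).mp hin)
    rw [if_pos hin, PySem.Chars.splitMax?, if_neg (by simp),
      pvSplit_head coords ['_'] hin (by simp)]
    unfold pyPartition
    simp [if_neg (by omega : ¬ PySem.Chars.find coords ['_'] < 0)]
  · rw [if_neg hin]
    unfold pyPartition
    simp [pvFind_neg_of_not_isIn hin]

-- ===== VERDICT (by name: the statement is the Claim_ definition above) =====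
theorem parse_csn_spec : Claim_equal_parse_csn := by
  intro csn _ hpre
  unfold Spec_parse_csn parse_csn parse_csn_alt
  simp only [pvCsnC_A, pvCsnC_B]
  unfold Pre_parse_csn at hpre
  generalize hG : pvCPart csn.toList = s at *
  have hfne : (pvMarkers.filter (fun x => PySem.Chars.isIn x s)).map
      (fun x => PySem.Chars.find s x) ≠ [] := by
    rw [List.any_eq_true] at hpre
    rcases hpre with ⟨x, hx, hin⟩
    simp only [ne_eq, List.map_eq_nil_iff, List.filter_eq_nil_iff, not_forall]
    exact ⟨x, hx, by simp [hin]⟩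
  obtain ⟨m, hm⟩ : ∃ m, PySem.List.min? ((pvMarkers.filter (fun x => PySem.Chars.isIn x s)).map
      (fun x => PySem.Chars.find s x)) (fun v => v) = some m := by
    cases h : PySem.List.min? ((pvMarkers.filter (fun x => PySem.Chars.isIn x s)).map
        (fun x => PySem.Chars.find s x)) (fun v => v) with
    | none => exact absurd ((PySem.List.min?_eq_none_iff _ _).mp h) hfne
    | some m => exact ⟨m, rfl⟩
  obtain ⟨hnn, hM, hlt⟩ := pvMin_found s hm
  rw [hm, pvFirstMark_eq s m.toNat hM hlt]
  have hcast : ((m.toNat : Nat) : Int) = m := Int.toNat_of_nonneg hnn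
  simp only [hcast]
  have := pvTail_eq s m
  simp only [] at this
  exact this
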